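-- pv_equiv track=rewrite | github.com/corneliuciubara/Functii | temapentruacasa2.py | cmmmc
-- ===== SOURCE A (Python) =====
-- def max(x, y, z):
--     if x>y:
--         if z>x:
--             return z
--         else:
--             return x
--     else:
--         if z>y:
--             return z
--         else:
--             return y
--
-- def cmmmc(x, y, z, mare=0):
--     if mare==0:
--         mare = max(x,y,z)
--     lcm = x*y*z
--     while True:
--         if ((mare % x == 0) and (mare % y == 0) and (mare % z == 0)):
--             lcm = mare
--             break
--         mare += 1
--     return lcm
-- ===== SOURCE B (Python) =====
-- def _gcd(a, b):
--     a, b = abs(a), abs(b)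
--     while b:
--         a, b = b, a % b
--     return a
--
-- def cmmmc(x, y, z, mare=0):
--     if mare == 0:
--         mare = max(x, y, z)
--     L = abs(x * y) // _gcd(x, y)
--     L = abs(L * z) // _gcd(L, z)
--     return -(-mare // L) * L
-- ===== Notes on version B (the rewrite author's own statement) =====
-- stated objective: faster
-- what changed: Replaces the unit-step linear search for a common multiple by computing L = lcm(x,y,z) via the Euclidean algorithm and returning the first multiple of L at or above the starting point with one ceiling division.
import Mathlib
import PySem

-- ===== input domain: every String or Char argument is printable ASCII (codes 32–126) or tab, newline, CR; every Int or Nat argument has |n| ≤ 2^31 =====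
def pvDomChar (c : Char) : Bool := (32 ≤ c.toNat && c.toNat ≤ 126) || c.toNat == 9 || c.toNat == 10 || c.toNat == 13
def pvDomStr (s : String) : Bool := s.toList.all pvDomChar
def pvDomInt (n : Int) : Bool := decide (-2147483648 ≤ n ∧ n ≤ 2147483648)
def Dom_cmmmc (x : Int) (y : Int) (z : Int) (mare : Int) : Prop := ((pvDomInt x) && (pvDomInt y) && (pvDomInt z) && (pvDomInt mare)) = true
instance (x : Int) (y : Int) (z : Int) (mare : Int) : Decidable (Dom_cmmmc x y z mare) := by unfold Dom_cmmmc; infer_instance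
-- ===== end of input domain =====

-- B replaces A's unit-step search for a common multiple by an exact closed form:
-- L = lcm(x,y,z) via the Euclidean algorithm, then one ceiling division gives the
-- first multiple of L at or above the starting point.

-- ===== PORT A =====
-- helper 'max' of A (the module shadows the builtin with this three-argument max)
def cmmmcMax (x y z : Int) : Int :=
  if x > y then (if z > x then z else x) else (if z > y then z else y)

-- the 'while True' search; the fuel (Nat.lcm …, supplied at the call site) is a
-- totality device only: under Pre_ the loop always breaks strictly before fuel 0,
-- and the fuel-0 value is the 'lcm' variable's initial value x*y*z.
def cmmmcLoop (x y z : Int) : Nat → Int → Int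
  | 0, _ => x * y * z
  | fuel + 1, mare =>
    if PySem.Int.mod mare x = 0 ∧ PySem.Int.mod mare y = 0 ∧ PySem.Int.mod mare z = 0 then
      mare
    else
      cmmmcLoop x y z fuel (mare + 1)

def cmmmc (x : Int) (y : Int) (z : Int) (mare : Int) : Int :=
  let mare' := if mare = 0 then cmmmcMax x y z else mare
  cmmmcLoop x y z (Nat.lcm (Nat.lcm x.natAbs y.natAbs) z.natAbs) mare'

-- ===== PORT B =====
-- termination fact for the Euclidean loop (cited by pyGcdLoop's decreasing_by)
theorem pymod_natAbs_lt (a b : Int) (h : ¬ b = 0) : (PySem.Int.mod a b).natAbs < b.natAbs := by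
  rcases lt_or_gt_of_ne h with hb | hb
  · have := PySem.Int.mod_neg_bounds a hb
    omega
  · have h1 := PySem.Int.mod_nonneg a hb
    have h2 := PySem.Int.mod_lt a hb
    omega

-- 'while b: a, b = b, a % b'
def pyGcdLoop (a b : Int) : Int :=
  if h : b = 0 then a else pyGcdLoop b (PySem.Int.mod a b)
termination_by b.natAbs
decreasing_by exact pymod_natAbs_lt a b h

-- _gcd(a, b) of Source B
def pyGcd (a b : Int) : Int := pyGcdLoop (abs a) (abs b)

def cmmmc_alt (x : Int) (y : Int) (z : Int) (mare : Int) : Int :=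
  let mare' := if mare = 0 then max x (max y z) else mare
  let L1 := PySem.Int.floordiv (abs (x * y)) (pyGcd x y)
  let L2 := PySem.Int.floordiv (abs (L1 * z)) (pyGcd L1 z)
  Neg.neg (PySem.Int.floordiv (-mare') L2) * L2   -- '-(-mare // L) * L'

-- ===== PRECONDITION & SPEC =====
-- Pre_ excludes exactly the inputs where the Python A raises ZeroDivisionError:
-- whenever one of x, y, z is 0 the '%' test eventually hits a zero divisor.
def Pre_cmmmc (x : Int) (y : Int) (z : Int) (mare : Int) : Prop := x ≠ 0 ∧ y ≠ 0 ∧ z ≠ 0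
instance (x : Int) (y : Int) (z : Int) (mare : Int) : Decidable (Pre_cmmmc x y z mare) := by unfold Pre_cmmmc; infer_instance
def pvWitness_cmmmc : Int × Int × Int × Int := (4, 6, 10, 0)

def Spec_cmmmc (x : Int) (y : Int) (z : Int) (mare : Int) (out : Int) : Prop := out = cmmmc_alt x y z mare
instance (x : Int) (y : Int) (z : Int) (mare : Int) (out : Int) : Decidable (Spec_cmmmc x y z mare out) := by unfold Spec_cmmmc; infer_instance

-- ===== CLAIM (what is proved, stated in full; the proofs are below) =====
def Claim_equal_cmmmc : Prop := ∀ (x : Int) (y : Int) (z : Int) (mare : Int), Dom_cmmmc x y z mare → Pre_cmmmc x y z mare → Spec_cmmmc x y z mare (cmmmc x y z mare)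

-- ===== LEMMAS AND PROOFS =====

-- the Euclidean loop computes gcd on nonnegative arguments
theorem pyGcdLoop_eq (n : Nat) : ∀ (a b : Int), 0 ≤ a → 0 ≤ b → b.natAbs ≤ n →
    pyGcdLoop a b = (Int.gcd a b : Int) := by
  induction n with
  | zero =>
    intro a b ha hb hn
    have : b = 0 := by omega
    subst this
    rw [pyGcdLoop]
    simp [Int.gcd]
    exact (abs_of_nonneg ha).symm
  | succ n ih =>
    intro a b ha hb hn
    by_cases h : b = 0
    · subst h; rw [pyGcdLoop]; simp [Int.gcd]; exact (abs_of_nonneg ha).symm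
    · have hbpos : 0 < b := lt_of_le_of_ne hb (Ne.symm h)
      rw [pyGcdLoop]
      simp only [h, dite_false]
      have hmn := PySem.Int.mod_nonneg a hbpos
      have hml := PySem.Int.mod_lt a hbpos
      rw [ih b (PySem.Int.mod a b) hb hmn (by omega)]
      rw [PySem.Int.mod_eq_emod_of_pos hbpos]
      have hnat : (a % b).natAbs = a.natAbs % b.natAbs := by
        rcases Int.eq_ofNat_of_zero_le ha with ⟨A, rfl⟩
        rcases Int.eq_ofNat_of_zero_le hb with ⟨B, rfl⟩
        rw [← Int.natCast_mod, Int.natAbs_natCast, Int.natAbs_natCast, Int.natAbs_natCast]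
      simp only [Int.gcd]
      rw [hnat, Nat.gcd_comm b.natAbs, ← Nat.gcd_rec, Nat.gcd_comm]

theorem pyGcd_eq (a b : Int) : pyGcd a b = (Int.gcd a b : Int) := by
  unfold pyGcd
  rw [pyGcdLoop_eq (|b|).natAbs |a| |b| (abs_nonneg a) (abs_nonneg b) le_rfl]
  simp [Int.gcd, Int.natAbs_abs]

-- the ceiling-division formula is 'start + distance to the next multiple'
theorem ceil_formula (m : Int) (L : Int) (hL : 0 < L) :
    Neg.neg (PySem.Int.floordiv (-m) L) * L = m + (-m) % L := by
  rw [PySem.Int.floordiv_eq_ediv_of_pos hL]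
  have h : (-m) % L + L * ((-m) / L) = -m := Int.emod_add_ediv (-m) L
  linear_combination -h

-- the search loop returns the first multiple of L at or above m
theorem loop_eq (x y z : Int) (L : Nat) (hL : 0 < (L : Int))
    (hdvd : ∀ m : Int, (L : Int) ∣ m ↔ (x ∣ m ∧ y ∣ m ∧ z ∣ m)) :
    ∀ (f : Nat) (m : Int), ((-m) % (L : Int)).toNat < f →
      cmmmcLoop x y z f m = m + (-m) % (L : Int) := by
  intro f
  induction f with
  | zero => intro m hm; exact absurd hm (Nat.not_lt_zero _)
  | succ f ih =>
    intro m hm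
    have hr0 : 0 ≤ (-m) % (L : Int) := Int.emod_nonneg _ (by omega)
    have hrL : (-m) % (L : Int) < L := Int.emod_lt_of_pos _ hL
    by_cases hd : (L : Int) ∣ m
    · have hcond : PySem.Int.mod m x = 0 ∧ PySem.Int.mod m y = 0 ∧ PySem.Int.mod m z = 0 := by
        obtain ⟨h1, h2, h3⟩ := (hdvd m).mp hd
        exact ⟨(PySem.Int.mod_eq_zero_iff_dvd m x).mpr h1,
               (PySem.Int.mod_eq_zero_iff_dvd m y).mpr h2,
               (PySem.Int.mod_eq_zero_iff_dvd m z).mpr h3⟩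
      have hr : (-m) % (L : Int) = 0 := Int.emod_eq_zero_of_dvd (dvd_neg.mpr hd)
      rw [cmmmcLoop, if_pos hcond, hr]
      omega
    · have hcond : ¬(PySem.Int.mod m x = 0 ∧ PySem.Int.mod m y = 0 ∧ PySem.Int.mod m z = 0) := by
        rintro ⟨h1, h2, h3⟩
        exact hd ((hdvd m).mpr ⟨(PySem.Int.mod_eq_zero_iff_dvd m x).mp h1,
                                (PySem.Int.mod_eq_zero_iff_dvd m y).mp h2,
                                (PySem.Int.mod_eq_zero_iff_dvd m z).mp h3⟩)
      have hrpos : 0 < (-m) % (L : Int) := by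
        have hne : (-m) % (L : Int) ≠ 0 := fun h0 => hd (dvd_neg.mp (Int.dvd_of_emod_eq_zero h0))
        omega
      have hL1 : (1 : Int) < L := by omega
      have hr1 : (-(m + 1)) % (L : Int) = (-m) % (L : Int) - 1 := by
        have e1 : (-(m + 1) : Int) = (-m) - 1 := by ring
        rw [e1, Int.sub_emod, Int.emod_eq_of_lt (by omega) hL1,
            Int.emod_eq_of_lt (by omega) (by omega)]
      rw [cmmmcLoop, if_neg hcond, ih (m + 1) (by omega), hr1]
      ring

theorem cmmmcMax_eq (x y z : Int) : cmmmcMax x y z = max x (max y z) := by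
  unfold cmmmcMax; split_ifs <;> omega

-- ===== VERDICT (by name: the statement is the Claim_ definition above) =====
theorem cmmmc_spec : Claim_equal_cmmmc := by
  intro x y z mare hdom hpre
  obtain ⟨hx, hy, hz⟩ := hpre
  unfold Spec_cmmmc cmmmc cmmmc_alt
  simp only [cmmmcMax_eq]
  set m0 : Int := if mare = 0 then max x (max y z) else mare with hm0
  set n1 : Nat := Nat.lcm x.natAbs y.natAbs with hn1
  set n2 : Nat := Nat.lcm n1 z.natAbs with hn2
  have hxn : x.natAbs ≠ 0 := by omega
  have hyn : y.natAbs ≠ 0 := by omega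
  have hzn : z.natAbs ≠ 0 := by omega
  have hn1ne : n1 ≠ 0 := Nat.lcm_ne_zero hxn hyn
  have hn2ne : n2 ≠ 0 := Nat.lcm_ne_zero hn1ne hzn
  have hLpos : (0 : Int) < (n2 : Int) := by exact_mod_cast Nat.pos_of_ne_zero hn2ne
  have hL1 : PySem.Int.floordiv |x * y| (pyGcd x y) = (n1 : Int) := by
    have habs1 : |x * y| = ((x.natAbs * y.natAbs : Nat) : Int) := by
      rw [Int.abs_eq_natAbs, Int.natAbs_mul]
    rw [habs1]
    rw [pyGcd_eq]
    rw [show Int.gcd x y = Nat.gcd x.natAbs y.natAbs from rfl]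
    rw [PySem.Int.floordiv_natCast]
    rw [hn1]
    rfl
  have hL2 : PySem.Int.floordiv |(n1 : Int) * z| (pyGcd (n1 : Int) z) = (n2 : Int) := by
    have habs2 : |(n1 : Int) * z| = ((n1 * z.natAbs : Nat) : Int) := by
      rw [Int.abs_eq_natAbs, Int.natAbs_mul, Int.natAbs_natCast]
    have hg2 : Int.gcd (n1 : Int) z = Nat.gcd n1 z.natAbs := by
      simp [Int.gcd, Int.natAbs_natCast]
    rw [habs2]
    rw [pyGcd_eq]
    rw [hg2]
    rw [PySem.Int.floordiv_natCast]
    rw [hn2]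
    rfl
  have hdvd : ∀ m : Int, ((n2 : Int)) ∣ m ↔ (x ∣ m ∧ y ∣ m ∧ z ∣ m) := by
    intro m
    constructor
    · intro h
      rw [← Int.natAbs_dvd_natAbs, Int.natAbs_natCast] at h
      refine ⟨?_, ?_, ?_⟩ <;> rw [← Int.natAbs_dvd_natAbs]
      · exact dvd_trans (dvd_trans (Nat.dvd_lcm_left _ _) (Nat.dvd_lcm_left _ _)) h
      · exact dvd_trans (dvd_trans (Nat.dvd_lcm_right _ _) (Nat.dvd_lcm_left _ _)) h
      · exact dvd_trans (Nat.dvd_lcm_right _ _) h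
    · rintro ⟨h1, h2, h3⟩
      rw [← Int.natAbs_dvd_natAbs] at h1 h2 h3 ⊢
      rw [Int.natAbs_natCast]
      exact Nat.lcm_dvd (Nat.lcm_dvd h1 h2) h3
  have hfuel : ((-m0) % (n2 : Int)).toNat < n2 := by
    have := Int.emod_lt_of_pos (-m0) hLpos
    have := Int.emod_nonneg (-m0) (by omega : (n2 : Int) ≠ 0)
    omega
  rw [hL1, hL2, loop_eq x y z n2 hLpos hdvd n2 m0 hfuel, ceil_formula m0 (n2 : Int) hLpos]
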